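-- pv_equiv track=rewrite | github.com/CodingProgrammer/HackerRank_Python | (Algorithm)Bear_and_Steady_Gene(Two_Points_Dict).py | steadyGene
-- ===== SOURCE A (Python) =====
-- def steadyGene(gene):
--     length = len(gene)
--     limit = length // 4
--     count_gene = {'A':0, 'C':0, 'G':0, 'T':0}
--     for c in gene:
--         count_gene[c] += 1
--     for key, value in count_gene.items():
--         if value > limit:
--             count_gene[key] = value - limit
--         else:
--             count_gene[key] = 0
--     num_2re = sum(count_gene.values())
--     if num_2re == 0:
--         return 0
--     start, end = 0, 0
--     res = length
--     count_sub = {'A':0, 'C':0, 'G':0, 'T':0}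
--     while end < length:
--         hasFound = True
--         for k in count_sub:
--             if count_sub[k] < count_gene[k]:
--                 hasFound = False
--                 break
--
--         if hasFound == True:
--             # required substring has found update minimum length res
--             if res > end - start:
--                 res = end - start
--             # increase start pointer to less the length of substring if possible
--             count_sub[gene[start]] -= 1
--             start += 1
--
--         elif hasFound == False:
--             # required substring not found yet
--             count_sub[gene[end]] += 1
--             end += 1
--     return res
-- ===== SOURCE B (Python) =====
-- def steadyGene(gene):
--     n = len(gene)
--     limit = n // 4
--     need = {c: max(0, gene.count(c) - limit) for c in "ACGT"}
--
--     def feasible(size):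
--         # slide a fixed window of length `size` across gene
--         cnt = {'A': 0, 'C': 0, 'G': 0, 'T': 0}
--         for c in gene[:size]:
--             cnt[c] += 1
--         if all(cnt[k] >= need[k] for k in need):
--             return True
--         for s in range(n - size):
--             cnt[gene[s]] -= 1
--             cnt[gene[s + size]] += 1
--             if all(cnt[k] >= need[k] for k in need):
--                 return True
--         return False
--
--     # feasibility is monotone in the window length; binary-search the minimum
--     lo, hi = 0, n
--     while lo < hi:
--         mid = (lo + hi) // 2
--         if feasible(mid):
--             hi = mid
--         else:
--             lo = mid + 1
--     return lo
-- ===== Notes on version B (the rewrite author's own statement) =====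
-- stated objective: alternative
-- what changed: Replaces A's single two-pointer sweep by a binary search over the window length with a fixed-size sliding-window feasibility check; this also repairs A's failure to consider windows that end at the very end of the gene.
-- intended difference: On genes whose every shortest feasible substring (of some length L < n) is the suffix ending at position n, A never checks that window (its loop stops when end reaches len(gene)) and returns a value larger than the true minimum, while B returns the true minimal length, which is the intended answer of the problem. — e.g. on steadyGene("GACCG"): A returns 3, B returns 2
import Mathlib
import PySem

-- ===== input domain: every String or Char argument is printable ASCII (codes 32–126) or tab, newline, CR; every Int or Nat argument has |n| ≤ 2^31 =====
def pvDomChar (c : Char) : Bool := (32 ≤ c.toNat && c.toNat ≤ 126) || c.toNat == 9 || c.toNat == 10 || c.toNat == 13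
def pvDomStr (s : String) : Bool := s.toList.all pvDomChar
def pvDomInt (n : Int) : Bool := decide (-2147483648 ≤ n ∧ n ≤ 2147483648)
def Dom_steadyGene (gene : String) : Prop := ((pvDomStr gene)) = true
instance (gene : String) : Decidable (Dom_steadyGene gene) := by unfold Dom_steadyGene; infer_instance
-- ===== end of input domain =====

set_option maxRecDepth 10000


-- B replaces A's single two-pointer sweep by a binary search on the window length with a sliding
-- fixed-size feasibility check (objective: alternative); B also considers windows ending at the very
-- end of the gene, which A's loop never checks (see D_steadyGene below).

-- ===== PORT A =====

-- the dict literal {'A':0, 'C':0, 'G':0, 'T':0}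
def pvDict4 : PySem.Dict Char Int := PySem.Dict.ofList [('A', 0), ('C', 0), ('G', 0), ('T', 0)]

-- the `while end < length` loop of A, as structural recursion on a fuel that bounds the
-- iteration count (each iteration increments `start` or `end`, so 2*length+2 always suffices)
def steadyGeneLoop (l : List Char) (cg : PySem.Dict Char Int) :
    PySem.Dict Char Int → Nat → Nat → Int → Nat → Int
  | _, _, _, res, 0 => res
  | cs, s, e, res, fuel + 1 =>
    if e < l.length then
      -- `for k in count_sub: if count_sub[k] < count_gene[k]: hasFound = False; break`
      let hasFound := cs.keys.all (fun k => !(cs.getD k 0 < cg.getD k 0))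
      if hasFound then
        let res' := if res > (e : Int) - (s : Int) then (e : Int) - (s : Int) else res
        match PySem.List.pyGet? l (s : Int) with
        | some c => steadyGeneLoop l cg (cs.modify c 0 (· - 1)) (s + 1) e res' fuel
        | none => res'   -- gene[start] out of range: Python raises IndexError; never reached from steadyGene
      else
        match PySem.List.pyGet? l (e : Int) with
        | some c => steadyGeneLoop l cg (cs.modify c 0 (· + 1)) s (e + 1) res fuel
        | none => res    -- unreachable: e < length
    else res

def steadyGene (gene : String) : Int :=
  let l := gene.toList
  let length := l.length
  let limit : Nat := length / 4            -- length // 4 on a non-negative int = Nat division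
  -- `for c in gene: count_gene[c] += 1` (modify is exact when c is a key; on other chars Python
  -- raises KeyError — those inputs are excluded by Pre_steadyGene)
  let cg1 := l.foldl (fun d c => d.modify c 0 (· + 1)) pvDict4
  -- `for key, value in count_gene.items(): count_gene[key] = value - limit if value > limit else 0`
  let cg := cg1.items.foldl
    (fun d kv => d.insert kv.1 (if kv.2 > (limit : Int) then kv.2 - (limit : Int) else 0)) cg1
  let num2re := cg.values.sum
  if num2re = 0 then 0
  else steadyGeneLoop l cg pvDict4 0 0 (length : Int) (2 * length + 2)

-- ===== PORT B =====

-- `all(cnt[k] >= need[k] for k in need)`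
def altCheck (cnt need : PySem.Dict Char Int) : Bool :=
  need.keys.all (fun k => decide (need.getD k 0 ≤ cnt.getD k 0))

-- `for s in range(n - size): cnt[gene[s]] -= 1; cnt[gene[s+size]] += 1; if all(...): return True`
-- (structural recursion on the number of remaining iterations)
def altSlide (l : List Char) (need : PySem.Dict Char Int) (size : Nat) :
    PySem.Dict Char Int → Nat → Nat → Bool
  | _, _, 0 => false
  | cnt, s, rem + 1 =>
    match l[s]?, l[s + size]? with
    | some c1, some c2 =>
      let cnt' := (cnt.modify c1 0 (· - 1)).modify c2 0 (· + 1)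
      if altCheck cnt' need then true else altSlide l need size cnt' (s + 1) rem
    | _, _ => false   -- out of range: never reached, rem counts the iterations of range(n - size)

def altFeasible (l : List Char) (need : PySem.Dict Char Int) (size : Nat) : Bool :=
  let cnt := (l.take size).foldl (fun d c => d.modify c 0 (· + 1))
    (PySem.Dict.ofList [('A', 0), ('C', 0), ('G', 0), ('T', 0)])
  if altCheck cnt need then true else altSlide l need size cnt 0 (l.length - size)

-- `while lo < hi: mid = (lo+hi)//2; ...` (fuel n+1 bounds the bisection depth)
def altSearch (l : List Char) (need : PySem.Dict Char Int) : Nat → Nat → Nat → Int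
  | lo, _, 0 => (lo : Int)
  | lo, hi, fuel + 1 =>
    if lo < hi then
      let mid := (lo + hi) / 2
      if altFeasible l need mid then altSearch l need lo mid fuel
      else altSearch l need (mid + 1) hi fuel
    else (lo : Int)

def steadyGene_alt (gene : String) : Int :=
  let l := gene.toList
  let n := l.length
  let limit : Nat := n / 4
  let need := (['A', 'C', 'G', 'T'] : List Char).foldl
    (fun d c => d.insert c (max 0 ((l.count c : Int) - (limit : Int)))) PySem.Dict.empty
  altSearch l need 0 n (n + 1)

-- ===== PRECONDITION & SPEC =====

-- Pre_ excludes exactly the strings containing a character that is not one of the four nucleotide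
-- letters (uppercase A/C/G/T), on which A raises KeyError.
def Pre_steadyGene (gene : String) : Prop :=
  ∀ c ∈ gene.toList, c ∈ (['A', 'C', 'G', 'T'] : List Char)
instance (gene : String) : Decidable (Pre_steadyGene gene) :=
  decidable_of_iff
    ((gene.toList.all (fun c => decide (c ∈ (['A', 'C', 'G', 'T'] : List Char)))) = true)
    (by simp [Pre_steadyGene, List.all_eq_true])

def pvWitness_steadyGene : String := "GAAA"

-- On genes whose every shortest feasible excision window (of some length L < n) is the suffix
-- ending at position n, A never checks that window (its loop stops once `end` reaches len(gene))
-- and returns a larger value, while B returns the true minimal length, the intended answer.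
-- (A window gene[s:s+L] is feasible when what remains of the gene after removing it has at most
-- len(gene)//4 copies of each nucleotide letter.)
def D_steadyGene (gene : String) : Prop :=
  ∃ L < gene.toList.length,
    (∀ c ∈ (['A', 'C', 'G', 'T'] : List Char),
      (gene.toList.take (gene.toList.length - L)).count c ≤ gene.toList.length / 4) ∧
    ¬ ∃ s < gene.toList.length, s + L ≤ gene.toList.length - 1 ∧
      ∀ c ∈ (['A', 'C', 'G', 'T'] : List Char),
        (gene.toList.take s ++ gene.toList.drop (s + L)).count c ≤ gene.toList.length / 4
instance (gene : String) : Decidable (D_steadyGene gene) :=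
  decidable_of_iff
    (((List.range gene.toList.length).any (fun L =>
        ((['A', 'C', 'G', 'T'] : List Char).all (fun c =>
          decide ((gene.toList.take (gene.toList.length - L)).count c ≤
            gene.toList.length / 4))) &&
        !((List.range gene.toList.length).any (fun s =>
          decide (s + L ≤ gene.toList.length - 1) &&
          ((['A', 'C', 'G', 'T'] : List Char).all (fun c =>
            decide ((gene.toList.take s ++ gene.toList.drop (s + L)).count c ≤
              gene.toList.length / 4))))))) = true)
    (by simp [D_steadyGene, List.any_eq_true, List.all_eq_true, List.mem_range])

def Spec_steadyGene (gene : String) (out : Int) : Prop :=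
  ¬ D_steadyGene gene → out = steadyGene_alt gene
instance (gene : String) (out : Int) : Decidable (Spec_steadyGene gene out) := by
  unfold Spec_steadyGene; infer_instance

def pvDiffWitness_steadyGene : String := "GACCG"
def pvDiffWitnessOut_steadyGene : Int × Int := (3, 2)

-- ===== CLAIM (what is proved, stated in full; the proofs are below) =====
def Claim_unchanged_steadyGene : Prop :=
  ∀ (gene : String), Dom_steadyGene gene → Pre_steadyGene gene →
    Spec_steadyGene gene (steadyGene gene)
def Claim_changed_steadyGene : Prop :=
  Dom_steadyGene (pvDiffWitness_steadyGene) ∧ Pre_steadyGene (pvDiffWitness_steadyGene) ∧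
    D_steadyGene (pvDiffWitness_steadyGene) ∧
    steadyGene (pvDiffWitness_steadyGene) = pvDiffWitnessOut_steadyGene.1 ∧
    steadyGene_alt (pvDiffWitness_steadyGene) = pvDiffWitnessOut_steadyGene.2 ∧
    pvDiffWitnessOut_steadyGene.1 ≠ pvDiffWitnessOut_steadyGene.2
def Claim_exact_steadyGene : Prop :=
  ∀ (gene : String), Dom_steadyGene gene → Pre_steadyGene gene → D_steadyGene gene →
    steadyGene gene ≠ steadyGene_alt gene

-- ===== LEMMAS AND PROOFS =====

-- spec-side abbreviations
def pvChars : List Char := ['A', 'C', 'G', 'T']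
-- number of copies of c that must be removed from gene
def pvNeed (l : List Char) (c : Char) : Nat := l.count c - l.length / 4
-- number of copies of c inside the window gene[s : s+L]
def pvWCnt (l : List Char) (s L : Nat) (c : Char) : Nat := ((l.drop s).take L).count c
-- removing the window gene[s : s+L] leaves a steady gene
def pvFeas (l : List Char) (s L : Nat) : Prop :=
  ∀ c ∈ (['A', 'C', 'G', 'T'] : List Char), pvNeed l c ≤ pvWCnt l s L c

-- the condition D_steadyGene states on a window, re-expressed through pvFeas
theorem feas_iff_rem (l : List Char) (s L : Nat) :
    pvFeas l s L ↔ ∀ c ∈ (['A', 'C', 'G', 'T'] : List Char),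
      (l.take s ++ l.drop (s + L)).count c ≤ l.length / 4 := by
  have hsplit : l = l.take s ++ ((l.drop s).take L ++ (l.drop s).drop L) := by
    rw [List.take_append_drop, List.take_append_drop]
  have hdd : (l.drop s).drop L = l.drop (s + L) := by
    rw [List.drop_drop]
    try congr 1
    try omega
  have hcnt : ∀ c : Char, l.count c =
      (l.take s).count c + pvWCnt l s L c + (l.drop (s + L)).count c := by
    intro c
    conv_lhs => rw [hsplit]
    rw [List.count_append, List.count_append, hdd]
    unfold pvWCnt
    omega
  constructor
  · intro h c hc
    have h1 := h c hc
    have h2 := hcnt c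
    unfold pvNeed at h1
    rw [List.count_append]
    omega
  · intro h c hc
    have h1 := h c hc
    have h2 := hcnt c
    unfold pvNeed
    rw [List.count_append] at h1
    omega

theorem feas_iff_suffix (l : List Char) (L : Nat) (hL : L ≤ l.length) :
    pvFeas l (l.length - L) L ↔ ∀ c ∈ (['A', 'C', 'G', 'T'] : List Char),
      (l.take (l.length - L)).count c ≤ l.length / 4 := by
  rw [feas_iff_rem]
  have hdrop : l.drop (l.length - L + L) = [] := by
    apply List.drop_eq_nil_of_le
    omega
  simp [hdrop]

theorem D_iff (gene : String) :
    D_steadyGene gene ↔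
      ∃ L < gene.toList.length,
        pvFeas gene.toList (gene.toList.length - L) L ∧
          ¬ ∃ s < gene.toList.length, s + L ≤ gene.toList.length - 1 ∧
            pvFeas gene.toList s L := by
  unfold D_steadyGene
  constructor
  · rintro ⟨L, hL, h1, h2⟩
    refine ⟨L, hL, (feas_iff_suffix _ L (by omega)).mpr h1, ?_⟩
    rintro ⟨s, hs1, hs2, hs3⟩
    exact h2 ⟨s, hs1, hs2, (feas_iff_rem _ s L).mp hs3⟩
  · rintro ⟨L, hL, h1, h2⟩
    refine ⟨L, hL, (feas_iff_suffix _ L (by omega)).mp h1, ?_⟩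
    rintro ⟨s, hs1, hs2, hs3⟩
    exact h2 ⟨s, hs1, hs2, (feas_iff_rem _ s L).mpr hs3⟩
def FeasP (l : List Char) (L : Nat) : Prop := ∃ s, s + L ≤ l.length ∧ pvFeas l s L
noncomputable def pvMF (l : List Char) : Nat := sInf {L | FeasP l L}
def pvW (l : List Char) (s e : Nat) : Set Nat :=
  {L | ∃ s', s ≤ s' ∧ e ≤ s' + L ∧ s' + L ≤ l.length - 1 ∧ pvFeas l s' L} ∪ {l.length}
noncomputable def pvG (l : List Char) (s e : Nat) : Nat := sInf (pvW l s e)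
def pvZ (l : List Char) : Prop := ∀ c ∈ pvChars, pvNeed l c = 0

theorem pvWCnt_sub (l : List Char) {s s' L L' : Nat} (h1 : s' ≤ s) (h2 : s + L ≤ s' + L')
    (c : Char) : pvWCnt l s L c ≤ pvWCnt l s' L' c := by
  unfold pvWCnt
  have key : List.Sublist ((l.drop s).take L) ((l.drop s').take L') := by
    have hdec : (l.drop s').take L' =
        (l.drop s').take (s - s') ++ ((l.drop s).take (L' - (s - s'))) := by
      have h3 : (s - s') + (L' - (s - s')) = L' := by omega
      have hdrop : (l.drop s').drop (s - s') = l.drop s := by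
        rw [List.drop_drop]
        congr 1
        omega
      rw [← h3, List.take_add, hdrop]
      congr 2
      omega
    rw [hdec]
    have hstep : List.Sublist ((l.drop s).take L) ((l.drop s).take (L' - (s - s'))) := by
      have hLL : L ≤ L' - (s - s') := by omega
      have : (l.drop s).take L = ((l.drop s).take (L' - (s - s'))).take L := by
        rw [List.take_take, Nat.min_eq_left hLL]
      rw [this]
      exact List.take_sublist _ _
    exact hstep.trans (List.sublist_append_right _ _)
  exact key.count_le c

theorem pvFeas_mono (l : List Char) {s s' L L' : Nat} (h1 : s' ≤ s) (h2 : s + L ≤ s' + L')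
    (h : pvFeas l s L) : pvFeas l s' L' :=
  fun c hc => (h c hc).trans (pvWCnt_sub l h1 h2 c)



theorem pvWCnt_full (l : List Char) (c : Char) : pvWCnt l 0 l.length c = l.count c := by
  simp [pvWCnt]

theorem pvFeas_top (l : List Char) : pvFeas l 0 l.length := by
  intro c _; rw [pvWCnt_full]; exact Nat.sub_le _ _

theorem FeasP_top (l : List Char) : FeasP l l.length := ⟨0, by omega, pvFeas_top l⟩

theorem FeasP_mono (l : List Char) {L L' : Nat} (h1 : L ≤ L') (h2 : L' ≤ l.length)
    (h : FeasP l L) : FeasP l L' := by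
  obtain ⟨s, hs, hf⟩ := h
  by_cases hcase : s + L' ≤ l.length
  · exact ⟨s, hcase, pvFeas_mono l le_rfl (by omega) hf⟩
  · exact ⟨l.length - L', by omega, pvFeas_mono l (by omega) (by omega) hf⟩

theorem pvMF_feas (l : List Char) : FeasP l (pvMF l) := by
  have : pvMF l ∈ {L | FeasP l L} := Nat.sInf_mem ⟨l.length, FeasP_top l⟩
  exact this

theorem pvMF_le (l : List Char) {k : Nat} (hk : FeasP l k) : pvMF l ≤ k :=
  Nat.sInf_le hk

theorem pvW_nonempty (l : List Char) (s e : Nat) : (pvW l s e).Nonempty :=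
  ⟨l.length, Or.inr rfl⟩

theorem pvG_le_len (l : List Char) (s e : Nat) : pvG l s e ≤ l.length :=
  Nat.sInf_le (Or.inr rfl)

theorem pvG_mem (l : List Char) (s e : Nat) : pvG l s e ∈ pvW l s e :=
  Nat.sInf_mem (pvW_nonempty l s e)

theorem pvG_le (l : List Char) {s e k : Nat} (h : k ∈ pvW l s e) : pvG l s e ≤ k :=
  Nat.sInf_le h

theorem pvG_end (l : List Char) (s : Nat) (h1 : 1 ≤ l.length) : pvG l s l.length = l.length := by
  have hm := pvG_mem l s l.length
  rcases hm with h | h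
  · obtain ⟨s', _, h2, h3, _⟩ := h; omega
  · exact h

theorem pvG_found (l : List Char) {s e : Nat} (he : e < l.length) (hse : s ≤ e)
    (hf : pvFeas l s (e - s)) : pvG l s e = min (e - s) (pvG l (s + 1) e) := by
  apply le_antisymm
  · apply le_min
    · exact pvG_le l (Or.inl ⟨s, le_rfl, by omega, by omega, hf⟩)
    · rcases pvG_mem l (s + 1) e with h | h
      · obtain ⟨s', h1, h2, h3, h4⟩ := h
        exact pvG_le l (Or.inl ⟨s', by omega, h2, h3, h4⟩)
      · exact le_trans (pvG_le_len l s e) (le_of_eq h.symm)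
  · rcases pvG_mem l s e with h | h
    · obtain ⟨s', h1, h2, h3, h4⟩ := h
      rcases Nat.eq_or_lt_of_le h1 with heq | hlt
      · calc min (e - s) (pvG l (s + 1) e) ≤ e - s := min_le_left _ _
          _ ≤ _ := by omega
      · calc min (e - s) (pvG l (s + 1) e) ≤ pvG l (s + 1) e := min_le_right _ _
          _ ≤ _ := pvG_le l (Or.inl ⟨s', by omega, h2, h3, h4⟩)
    · calc min (e - s) (pvG l (s + 1) e) ≤ e - s := min_le_left _ _
        _ ≤ l.length := by omega
        _ = _ := h.symm

theorem pvG_notfound (l : List Char) {s e : Nat} (he : e < l.length) (hse : s ≤ e)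
    (hf : ¬ pvFeas l s (e - s)) : pvG l s e = pvG l s (e + 1) := by
  apply le_antisymm
  · rcases pvG_mem l s (e + 1) with h | h
    · obtain ⟨s', h1, h2, h3, h4⟩ := h
      exact pvG_le l (Or.inl ⟨s', h1, by omega, h3, h4⟩)
    · exact le_trans (pvG_le_len l s e) (le_of_eq h.symm)
  · rcases pvG_mem l s e with h | h
    · obtain ⟨s', h1, h2, h3, h4⟩ := h
      by_cases hcase : e + 1 ≤ s' + pvG l s e
      · exact pvG_le l (Or.inl ⟨s', h1, hcase, h3, h4⟩)
      · exfalso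
        exact hf (pvFeas_mono l h1 (by omega) h4)
    · rw [h]; exact pvG_le_len l s (e + 1)

theorem pvWCnt_shrink (l : List Char) {s e : Nat} (hs : s < l.length) (hse : s < e) (c : Char) :
    pvWCnt l s (e - s) c =
      (if l[s] = c then 1 else 0) + pvWCnt l (s + 1) (e - (s + 1)) c := by
  unfold pvWCnt
  rw [List.drop_eq_getElem_cons hs]
  have h1 : e - s = (e - (s + 1)) + 1 := by omega
  rw [h1, List.take_succ_cons, List.count_cons]
  by_cases hc : l[s] = c <;> simp [hc, beq_iff_eq] <;> omega

theorem pvWCnt_extend (l : List Char) {s e : Nat} (he : e < l.length) (hse : s ≤ e) (c : Char) :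
    pvWCnt l s (e + 1 - s) c = pvWCnt l s (e - s) c + (if l[e] = c then 1 else 0) := by
  unfold pvWCnt
  have h1 : e + 1 - s = (e - s) + 1 := by omega
  rw [h1, List.take_succ, List.count_append]
  congr 1
  have h2 : (l.drop s)[e - s]? = l[e]? := by
    rw [List.getElem?_drop]
    congr 1
    omega
  rw [h2, List.getElem?_eq_getElem he]
  by_cases hc : l[e] = c <;> simp [hc, beq_iff_eq]

theorem pvWCnt_slide (l : List Char) {s size : Nat} (h : s + size < l.length) (c : Char) :
    (pvWCnt l (s + 1) size c : Int) =
      pvWCnt l s size c - (if l[s]'(by omega) = c then 1 else 0)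
        + (if l[s + size] = c then 1 else 0) := by
  have hA := pvWCnt_shrink l (show s < l.length by omega) (show s < s + size + 1 by omega) c
  have hB := pvWCnt_extend l (show s + size < l.length from h) (show s ≤ s + size by omega) c
  have e1 : s + size + 1 - s = size + 1 := by omega
  have e2 : s + size + 1 - (s + 1) = size := by omega
  have e3 : s + size + 1 - 1 - s = size := by omega
  have e4 : s + size - s = size := by omega
  rw [e1, e2] at hA
  rw [e4] at hB
  have e5 : s + size + 1 - s = size + 1 := by omega
  rw [show s + size + 1 - s = size + 1 from e5] at *
  -- hA : pvWCnt l s (size+1) c = δ(l[s]) + pvWCnt l (s+1) size c  (careful: hB's LHS also size+1)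
  have hB' : pvWCnt l s (size + 1) c = pvWCnt l s size c + (if l[s + size] = c then 1 else 0) := by
    have : s + size + 1 - s = size + 1 := by omega
    rw [← this]
    exact hB
  by_cases h1 : l[s]'(by omega) = c <;> by_cases h2 : l[s + size] = c <;>
    simp [h1, h2] at hA hB' ⊢ <;> omega

theorem cg1_keys (l : List Char) (hpre : ∀ c ∈ l, c ∈ pvChars) :
    (l.foldl (fun d c => d.modify c 0 (· + 1)) pvDict4).keys = pvChars := by
  rw [PySem.Dict.keys_foldl_modify]
  have h0 : pvDict4.keys = pvChars := rfl
  rw [h0, PySem.Set.update_eq_append_filter]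
  have : (PySem.Set.ofList l).filter (fun y => !(PySem.Set.contains pvChars y)) = [] := by
    rw [List.filter_eq_nil_iff]
    intro a ha
    have : a ∈ l := (PySem.Set.mem_ofList _ _).mp ha
    simp [PySem.Set.contains]
    exact hpre a this
  rw [this, List.append_nil]

theorem cg1_getD (l : List Char) (c : Char) (hc : c ∈ pvChars) :
    (l.foldl (fun d c => d.modify c 0 (· + 1)) pvDict4).getD c 0 = (l.count c : Int) := by
  rw [PySem.Dict.getD_foldl_modify_add_one]
  have : pvDict4.getD c 0 = 0 := by fin_cases hc <;> rfl
  rw [this, zero_add]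

theorem foldl_insert_getD_not_mem (f : Int → Int) (ps : List (Char × Int))
    (acc : PySem.Dict Char Int) (c : Char) (hc : c ∉ ps.map Prod.fst) :
    (ps.foldl (fun d kv => d.insert kv.1 (f kv.2)) acc).getD c 0 = acc.getD c 0 := by
  induction ps generalizing acc with
  | nil => rfl
  | cons p t ih =>
    simp only [List.map_cons, List.mem_cons, not_or] at hc
    simp only [List.foldl_cons]
    rw [ih _ hc.2, PySem.Dict.getD_insert]
    simp [hc.1]

theorem foldl_insert_getD_mem (f : Int → Int) (ps : List (Char × Int))
    (acc : PySem.Dict Char Int) (c : Char) (v : Int) (hnd : (ps.map Prod.fst).Nodup)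
    (hm : (c, v) ∈ ps) :
    (ps.foldl (fun d kv => d.insert kv.1 (f kv.2)) acc).getD c 0 = f v := by
  induction ps generalizing acc with
  | nil => cases hm
  | cons p t ih =>
    simp only [List.map_cons, List.nodup_cons] at hnd
    rcases List.mem_cons.mp hm with heq | hmem
    · subst heq
      simp only [List.foldl_cons]
      rw [foldl_insert_getD_not_mem f t _ c (by simpa using hnd.1)]
      rw [PySem.Dict.getD_insert]
      simp
    · simp only [List.foldl_cons]
      exact ih _ hnd.2 hmem

def pvCG (l : List Char) : PySem.Dict Char Int :=
  (l.foldl (fun d c => d.modify c 0 (· + 1)) pvDict4).items.foldl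
    (fun d kv => d.insert kv.1
      (if kv.2 > ((l.length / 4 : Nat) : Int) then kv.2 - ((l.length / 4 : Nat) : Int) else 0))
    (l.foldl (fun d c => d.modify c 0 (· + 1)) pvDict4)

theorem cg1_nodup_keys (l : List Char) (hpre : ∀ c ∈ l, c ∈ pvChars) :
    (l.foldl (fun d c => d.modify c 0 (· + 1)) pvDict4).keys.Nodup := by
  rw [cg1_keys l hpre]; decide

theorem cg1_items (l : List Char) (hpre : ∀ c ∈ l, c ∈ pvChars) :
    (l.foldl (fun d c => d.modify c 0 (· + 1)) pvDict4).items =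
      pvChars.map (fun k => (k, (l.count k : Int))) := by
  rw [PySem.Dict.items_eq_map_keys _ (cg1_nodup_keys l hpre) 0, cg1_keys l hpre]
  apply List.map_congr_left
  intro c hc
  rw [cg1_getD l c hc]

theorem pvCG_getD (l : List Char) (hpre : ∀ c ∈ l, c ∈ pvChars) (c : Char) (hc : c ∈ pvChars) :
    (pvCG l).getD c 0 = (pvNeed l c : Int) := by
  unfold pvCG
  rw [foldl_insert_getD_mem
    (fun v => if v > ((l.length / 4 : Nat) : Int) then v - ((l.length / 4 : Nat) : Int) else 0)
    _ _ c (l.count c : Int)]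
  · unfold pvNeed
    have h1 : (0 : Int) ≤ (l.count c : Int) := by positivity
    by_cases hgt : (l.count c : Int) > ((l.length / 4 : Nat) : Int) <;> simp [hgt] <;> omega
  · rw [cg1_items l hpre]
    simp only [List.map_map]
    simp [Function.comp_def]
    decide
  · rw [cg1_items l hpre]
    exact List.mem_map.mpr ⟨c, hc, rfl⟩

theorem pvCG_keys (l : List Char) (hpre : ∀ c ∈ l, c ∈ pvChars) :
    (pvCG l).keys = pvChars := by
  unfold pvCG
  rw [PySem.Dict.keys_foldl_insert_key]
  rw [cg1_items l hpre, cg1_keys l hpre]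
  simp only [List.map_map]
  have : (pvChars.map ((fun p => p.1) ∘ fun k => (k, (l.count k : Int)))) = pvChars := by
    simp [Function.comp_def]
  rw [this, PySem.Set.update_eq_append_filter]
  have : (PySem.Set.ofList pvChars).filter (fun y => !(PySem.Set.contains pvChars y)) = [] := by
    rw [List.filter_eq_nil_iff]
    intro a ha
    have : a ∈ pvChars := (PySem.Set.mem_ofList _ _).mp ha
    simp [PySem.Set.contains]
    exact this
  rw [this, List.append_nil]

theorem pvCG_nodup_keys (l : List Char) (hpre : ∀ c ∈ l, c ∈ pvChars) :
    (pvCG l).keys.Nodup := by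
  rw [pvCG_keys l hpre]; decide

theorem pvCG_sum_zero_iff (l : List Char) (hpre : ∀ c ∈ l, c ∈ pvChars) :
    ((pvCG l).values.sum = 0 ↔ pvZ l) := by
  rw [PySem.Dict.values_eq_map_keys _ (pvCG_nodup_keys l hpre) 0, pvCG_keys l hpre]
  have hA := pvCG_getD l hpre 'A' (by decide)
  have hC := pvCG_getD l hpre 'C' (by decide)
  have hG := pvCG_getD l hpre 'G' (by decide)
  have hT := pvCG_getD l hpre 'T' (by decide)
  show ([('A' : Char), 'C', 'G', 'T'].map fun k => (pvCG l).getD k 0).sum = 0 ↔ _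
  simp only [List.map_cons, List.map_nil, List.sum_cons, List.sum_nil, add_zero, hA, hC, hG, hT]
  constructor
  · intro h c hc
    fin_cases hc <;> omega
  · intro h
    have := h 'A' (by decide); have := h 'C' (by decide)
    have := h 'G' (by decide); have := h 'T' (by decide)
    omega


theorem pvZ_of_len_zero (l : List Char) (h : l.length = 0) : pvZ l := by
  intro c _
  unfold pvNeed
  have : l.count c ≤ l.length := List.count_le_length
  omega

theorem pvZ_of_feas_zero (l : List Char) {s : Nat} (h : pvFeas l s 0) : pvZ l := by
  intro c hc
  have := h c hc
  simp [pvWCnt] at this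
  omega

theorem keys_modify_mem (cs : PySem.Dict Char Int) (c : Char) (f : Int → Int)
    (h : c ∈ cs.keys) : (cs.modify c 0 f).keys = cs.keys := by
  rw [PySem.Dict.keys_modify, PySem.Dict.keys_insert_of_contains]
  exact (PySem.Dict.contains_iff_mem_keys _ _).mpr h

theorem loop_eq (l : List Char) (hpre : ∀ c ∈ l, c ∈ pvChars) (hnz : ¬ pvZ l)
    (CG : PySem.Dict Char Int) (hCG : ∀ c ∈ pvChars, CG.getD c 0 = (pvNeed l c : Int)) :
    ∀ (fuel s e r : Nat) (cs : PySem.Dict Char Int),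
      s ≤ e → e ≤ l.length → r ≤ l.length →
      cs.keys = pvChars →
      (∀ c ∈ pvChars, cs.getD c 0 = (pvWCnt l s (e - s) c : Int)) →
      (l.length - e) + (l.length + 1 - s) ≤ fuel →
      steadyGeneLoop l CG cs s e (r : Int) fuel = ((min r (pvG l s e) : Nat) : Int) := by
  intro fuel
  induction fuel with
  | zero =>
    intro s e r cs hse hen hr _ _ hfuel
    omega
  | succ fuel ih =>
    intro s e r cs hse hen hr hkeys hcs hfuel
    by_cases he : e < l.length
    · have hHF : (cs.keys.all (fun k => !(cs.getD k 0 < CG.getD k 0)) = true) ↔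
          pvFeas l s (e - s) := by
        rw [hkeys]
        have hA := hcs 'A' (by decide); have hC := hcs 'C' (by decide)
        have hG := hcs 'G' (by decide); have hT := hcs 'T' (by decide)
        have hA' := hCG 'A' (by decide); have hC' := hCG 'C' (by decide)
        have hG' := hCG 'G' (by decide); have hT' := hCG 'T' (by decide)
        show (List.all ['A', 'C', 'G', 'T'] _ = true) ↔ _
        simp only [List.all_cons, List.all_nil, Bool.and_true, Bool.and_eq_true,
          Bool.not_eq_true', decide_eq_false_iff_not, not_lt,
          hA, hC, hG, hT, hA', hC', hG', hT', Nat.cast_le]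
        constructor
        · intro h c hc
          fin_cases hc <;> tauto
        · intro h
          have := h 'A' (by decide); have := h 'C' (by decide)
          have := h 'G' (by decide); have := h 'T' (by decide)
          tauto
      by_cases hf : pvFeas l s (e - s)
      · -- found: shrink from the left
        have hslt : s < e := by
          rcases Nat.lt_or_ge s e with h | h
          · exact h
          · exfalso
            have hseq : s = e := by omega
            subst hseq
            exact hnz (pvZ_of_feas_zero l (by simpa using hf))
        have hsl : s < l.length := by omega
        have hget : PySem.List.pyGet? l (s : Int) = some (l[s]'hsl) := by
          rw [PySem.List.pyGet?_natCast, List.getElem?_eq_getElem hsl]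
        have hres' : (if (r : Int) > (e : Int) - (s : Int) then (e : Int) - (s : Int)
            else (r : Int)) = ((min r (e - s) : Nat) : Int) := by
          split_ifs with h <;> push_cast <;> omega
        have hstep : steadyGeneLoop l CG cs s e (r : Int) (fuel + 1) =
            steadyGeneLoop l CG (cs.modify (l[s]'hsl) 0 (· - 1)) (s + 1) e
              ((min r (e - s) : Nat) : Int) fuel := by
          show (if e < l.length then _ else _) = _
          rw [if_pos he]
          show (if (cs.keys.all fun k => !(cs.getD k 0 < CG.getD k 0)) = true
            then _ else _) = _
          rw [if_pos (hHF.mpr hf)]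
          rw [hget]
          show steadyGeneLoop l CG _ (s + 1) e
            (if (r : Int) > (e : Int) - (s : Int) then (e : Int) - (s : Int) else (r : Int))
            fuel = _
          rw [hres']
        rw [hstep]
        have hmem : l[s]'hsl ∈ pvChars := hpre _ (List.getElem_mem hsl)
        have hkeys' : (cs.modify (l[s]'hsl) 0 (· - 1)).keys = pvChars := by
          rw [keys_modify_mem cs _ _ (by rw [hkeys]; exact hmem)]
          exact hkeys
        have hcs' : ∀ c ∈ pvChars, (cs.modify (l[s]'hsl) 0 (· - 1)).getD c 0 =
            (pvWCnt l (s + 1) (e - (s + 1)) c : Int) := by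
          intro c hc
          rw [PySem.Dict.getD_modify]
          have hshr := pvWCnt_shrink l hsl hslt c
          by_cases hcc : c = l[s]'hsl
          · rw [if_pos hcc]
            subst hcc
            rw [hcs _ hc]
            simp at hshr
            omega
          · rw [if_neg hcc, hcs c hc]
            have : ¬ (l[s]'hsl = c) := fun h => hcc h.symm
            simp [this] at hshr
            omega
        rw [ih (s + 1) e (min r (e - s)) _ (by omega) hen (by omega) hkeys' hcs' (by omega)]
        rw [pvG_found l he hse hf]
        congr 1
        omega
      · -- not found: extend to the right
        have hget : PySem.List.pyGet? l (e : Int) = some (l[e]'he) := by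
          rw [PySem.List.pyGet?_natCast, List.getElem?_eq_getElem he]
        have hstep : steadyGeneLoop l CG cs s e (r : Int) (fuel + 1) =
            steadyGeneLoop l CG (cs.modify (l[e]'he) 0 (· + 1)) s (e + 1) (r : Int) fuel := by
          show (if e < l.length then _ else _) = _
          rw [if_pos he]
          show (if (cs.keys.all fun k => !(cs.getD k 0 < CG.getD k 0)) = true
            then _ else _) = _
          rw [if_neg (by simpa using fun h => hf (hHF.mp h))]
          rw [hget]
        rw [hstep]
        have hmem : l[e]'he ∈ pvChars := hpre _ (List.getElem_mem he)
        have hkeys' : (cs.modify (l[e]'he) 0 (· + 1)).keys = pvChars := by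
          rw [keys_modify_mem cs _ _ (by rw [hkeys]; exact hmem)]
          exact hkeys
        have hcs' : ∀ c ∈ pvChars, (cs.modify (l[e]'he) 0 (· + 1)).getD c 0 =
            (pvWCnt l s (e + 1 - s) c : Int) := by
          intro c hc
          rw [PySem.Dict.getD_modify]
          have hext := pvWCnt_extend l he hse c
          by_cases hcc : c = l[e]'he
          · rw [if_pos hcc]
            subst hcc
            rw [hcs _ hc]
            simp at hext
            omega
          · rw [if_neg hcc, hcs c hc]
            have : ¬ (l[e]'he = c) := fun h => hcc h.symm
            simp [this] at hext
            omega
        rw [ih s (e + 1) r _ (by omega) (by omega) hr hkeys' hcs' (by omega)]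
        rw [pvG_notfound l he hse hf]
    · -- e = length : the loop exits
      have hee : e = l.length := by omega
      subst hee
      have h1 : 1 ≤ l.length := by
        by_contra h
        exact hnz (pvZ_of_len_zero l (by omega))
      have hstep : steadyGeneLoop l CG cs s l.length (r : Int) (fuel + 1) = (r : Int) := by
        show (if l.length < l.length then _ else _) = _
        rw [if_neg (lt_irrefl _)]
      rw [hstep, pvG_end l s h1]
      congr 1
      omega

theorem steadyGene_unfold (gene : String) :
    steadyGene gene =
      (if (pvCG gene.toList).values.sum = 0 then (0 : Int)
       else steadyGeneLoop gene.toList (pvCG gene.toList) pvDict4 0 0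
         (gene.toList.length : Int) (2 * gene.toList.length + 2)) := rfl

theorem steadyGene_char_Z (gene : String) (hpre : Pre_steadyGene gene)
    (hz : pvZ gene.toList) : steadyGene gene = 0 := by
  rw [steadyGene_unfold, if_pos ((pvCG_sum_zero_iff gene.toList hpre).mpr hz)]

theorem steadyGene_char_NZ (gene : String) (hpre : Pre_steadyGene gene)
    (hnz : ¬ pvZ gene.toList) : steadyGene gene = ((pvG gene.toList 0 0 : Nat) : Int) := by
  rw [steadyGene_unfold, if_neg (fun h => hnz ((pvCG_sum_zero_iff gene.toList hpre).mp h))]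
  have := loop_eq gene.toList hpre hnz (pvCG gene.toList)
    (fun c hc => pvCG_getD gene.toList hpre c hc)
    (2 * gene.toList.length + 2) 0 0 gene.toList.length pvDict4
    (by omega) (by omega) (by omega) rfl
    (by intro c hc; simp [pvWCnt]; fin_cases hc <;> rfl)
    (by omega)
  rw [this]
  congr 1
  have := pvG_le_len gene.toList 0 0
  omega

-- ----- B side -----

def pvND (l : List Char) : PySem.Dict Char Int :=
  (['A', 'C', 'G', 'T'] : List Char).foldl
    (fun d c => d.insert c (max 0 ((l.count c : Int) - ((l.length / 4 : Nat) : Int))))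
    PySem.Dict.empty

theorem pvND_keys (l : List Char) : (pvND l).keys = pvChars := by
  unfold pvND
  simp [PySem.Dict.keys_insert_of_not_contains, PySem.Dict.contains_insert,
    PySem.Dict.contains_empty]
  rfl

theorem pvND_getD (l : List Char) (c : Char) (hc : c ∈ pvChars) :
    (pvND l).getD c 0 = (pvNeed l c : Int) := by
  unfold pvND pvNeed
  fin_cases hc <;>
    simp [PySem.Dict.getD_insert, PySem.Dict.getD_empty] <;> omega

theorem altCheck_iff (l : List Char) (cnt nd : PySem.Dict Char Int) (W : Char → Nat)
    (hkeys : nd.keys = pvChars)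
    (hnd : ∀ c ∈ pvChars, nd.getD c 0 = (pvNeed l c : Int))
    (hcnt : ∀ c ∈ pvChars, cnt.getD c 0 = (W c : Int)) :
    (altCheck cnt nd = true ↔ ∀ c ∈ pvChars, pvNeed l c ≤ W c) := by
  unfold altCheck
  rw [hkeys]
  have hA := hcnt 'A' (by decide); have hC := hcnt 'C' (by decide)
  have hG := hcnt 'G' (by decide); have hT := hcnt 'T' (by decide)
  have hA' := hnd 'A' (by decide); have hC' := hnd 'C' (by decide)
  have hG' := hnd 'G' (by decide); have hT' := hnd 'T' (by decide)
  show (List.all ['A', 'C', 'G', 'T'] _ = true) ↔ _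
  simp only [List.all_cons, List.all_nil, Bool.and_true, Bool.and_eq_true,
    decide_eq_true_eq, hA, hC, hG, hT, hA', hC', hG', hT', Nat.cast_le]
  constructor
  · intro h c hc
    fin_cases hc <;> tauto
  · intro h
    have := h 'A' (by decide); have := h 'C' (by decide)
    have := h 'G' (by decide); have := h 'T' (by decide)
    tauto

theorem altSlide_iff (l : List Char) (nd : PySem.Dict Char Int) (size : Nat)
    (hkeys : nd.keys = pvChars)
    (hnd : ∀ c ∈ pvChars, nd.getD c 0 = (pvNeed l c : Int)) :
    ∀ (rem s : Nat) (cnt : PySem.Dict Char Int),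
      (∀ c ∈ pvChars, cnt.getD c 0 = (pvWCnt l s size c : Int)) →
      rem = l.length - size - s →
      (altSlide l nd size cnt s rem = true ↔
        ∃ s', s < s' ∧ s' + size ≤ l.length ∧ pvFeas l s' size) := by
  intro rem
  induction rem with
  | zero =>
    intro s cnt _ hrem
    rw [show altSlide l nd size cnt s 0 = false from rfl]
    simp only [Bool.false_eq_true, false_iff]
    rintro ⟨s', h1, h2, _⟩
    omega
  | succ rem ih =>
    intro s cnt hcnt hrem
    have hlt : s + size < l.length := by omega
    have hs : s < l.length := by omega
    have h1 : l[s]? = some (l[s]'hs) := List.getElem?_eq_getElem hs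
    have h2 : l[s + size]? = some (l[s + size]'hlt) := List.getElem?_eq_getElem hlt
    have hstep : altSlide l nd size cnt s (rem + 1) =
        (if altCheck ((cnt.modify (l[s]'hs) 0 (· - 1)).modify (l[s + size]'hlt) 0 (· + 1)) nd
         then true
         else altSlide l nd size
           ((cnt.modify (l[s]'hs) 0 (· - 1)).modify (l[s + size]'hlt) 0 (· + 1)) (s + 1) rem) := by
      show (match l[s]?, l[s + size]? with
        | some c1, some c2 =>
            if altCheck ((cnt.modify c1 0 (· - 1)).modify c2 0 (· + 1)) nd then true
            else altSlide l nd size ((cnt.modify c1 0 (· - 1)).modify c2 0 (· + 1)) (s + 1) rem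
        | _, _ => false) = _
      rw [h1, h2]
    have hcnt' : ∀ c ∈ pvChars,
        ((cnt.modify (l[s]'hs) 0 (· - 1)).modify (l[s + size]'hlt) 0 (· + 1)).getD c 0 =
          (pvWCnt l (s + 1) size c : Int) := by
      intro c hc
      have hslc := pvWCnt_slide l hlt c
      rw [PySem.Dict.getD_modify]
      by_cases hc2 : c = l[s + size]'hlt <;> by_cases hc1 : c = l[s]'hs
      · rw [if_pos hc2, ← hc2, PySem.Dict.getD_modify, if_pos hc1, ← hc1, hcnt c hc]
        rw [if_pos hc1.symm, if_pos hc2.symm] at hslc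
        omega
      · rw [if_pos hc2, ← hc2, PySem.Dict.getD_modify, if_neg hc1, hcnt c hc]
        rw [if_neg (fun h => hc1 h.symm), if_pos hc2.symm] at hslc
        omega
      · rw [if_neg hc2, PySem.Dict.getD_modify, if_pos hc1, ← hc1, hcnt c hc]
        rw [if_pos hc1.symm, if_neg (fun h => hc2 h.symm)] at hslc
        omega
      · rw [if_neg hc2, PySem.Dict.getD_modify, if_neg hc1, hcnt c hc]
        rw [if_neg (fun h => hc1 h.symm), if_neg (fun h => hc2 h.symm)] at hslc
        omega
    rw [hstep]
    have hchk := altCheck_iff l ((cnt.modify (l[s]'hs) 0 (· - 1)).modify (l[s + size]'hlt) 0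
      (· + 1)) nd (pvWCnt l (s + 1) size) hkeys hnd hcnt'
    by_cases hcf : altCheck ((cnt.modify (l[s]'hs) 0 (· - 1)).modify (l[s + size]'hlt) 0
        (· + 1)) nd = true
    · rw [if_pos hcf]
      simp only [true_iff]
      exact ⟨s + 1, by omega, by omega, hchk.mp hcf⟩
    · rw [if_neg hcf]
      rw [ih (s + 1) _ hcnt' (by omega)]
      constructor
      · rintro ⟨s', hs1, hs2, hs3⟩
        exact ⟨s', by omega, hs2, hs3⟩
      · rintro ⟨s', hs1, hs2, hs3⟩
        rcases Nat.lt_or_ge (s + 1) s' with h | h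
        · exact ⟨s', h, hs2, hs3⟩
        · exfalso
          have : s' = s + 1 := by omega
          subst this
          exact hcf (hchk.mpr hs3)

theorem altFeasible_iff (l : List Char) (nd : PySem.Dict Char Int) (size : Nat)
    (hkeys : nd.keys = pvChars)
    (hnd : ∀ c ∈ pvChars, nd.getD c 0 = (pvNeed l c : Int))
    (hsz : size ≤ l.length) :
    (altFeasible l nd size = true ↔ FeasP l size) := by
  have hcnt0 : ∀ c ∈ pvChars,
      ((l.take size).foldl (fun d c => d.modify c 0 (· + 1))
        (PySem.Dict.ofList [('A', 0), ('C', 0), ('G', 0), ('T', 0)])).getD c 0 =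
        (pvWCnt l 0 size c : Int) := by
    intro c hc
    rw [PySem.Dict.getD_foldl_modify_add_one]
    have h0 : (PySem.Dict.ofList ([('A', 0), ('C', 0), ('G', 0), ('T', 0)] :
        List (Char × Int))).getD c 0 = 0 := by
      fin_cases hc <;> rfl
    rw [h0, zero_add]
    simp [pvWCnt]
  have hchk := altCheck_iff l _ nd (pvWCnt l 0 size) hkeys hnd hcnt0
  unfold altFeasible
  by_cases hcf : altCheck ((l.take size).foldl (fun d c => d.modify c 0 (· + 1))
      (PySem.Dict.ofList [('A', 0), ('C', 0), ('G', 0), ('T', 0)])) nd = true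
  · rw [if_pos hcf]
    simp only [true_iff]
    exact ⟨0, by omega, hchk.mp hcf⟩
  · rw [if_neg hcf]
    rw [altSlide_iff l nd size hkeys hnd (l.length - size) 0 _ hcnt0 (by omega)]
    constructor
    · rintro ⟨s', _, hs2, hs3⟩
      exact ⟨s', hs2, hs3⟩
    · rintro ⟨s', hs2, hs3⟩
      rcases Nat.eq_zero_or_pos s' with h | h
      · exfalso
        subst h
        exact hcf (hchk.mpr hs3)
      · exact ⟨s', by omega, hs2, hs3⟩

theorem altSearch_eq (l : List Char) (nd : PySem.Dict Char Int)
    (hkeys : nd.keys = pvChars)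
    (hnd : ∀ c ∈ pvChars, nd.getD c 0 = (pvNeed l c : Int)) :
    ∀ (fuel lo hi : Nat), hi - lo < fuel → lo ≤ hi → hi ≤ l.length →
      (∀ k < lo, ¬ FeasP l k) → FeasP l hi →
      altSearch l nd lo hi fuel = ((pvMF l : Nat) : Int) := by
  intro fuel
  induction fuel with
  | zero => intro lo hi h; omega
  | succ fuel ih =>
    intro lo hi hfuel hlohi hhi hlow hfeas
    by_cases hlt : lo < hi
    · have hmid1 : lo ≤ (lo + hi) / 2 := by omega
      have hmid2 : (lo + hi) / 2 < hi := by omega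
      have hstep : altSearch l nd lo hi (fuel + 1) =
          (if altFeasible l nd ((lo + hi) / 2) then altSearch l nd lo ((lo + hi) / 2) fuel
           else altSearch l nd ((lo + hi) / 2 + 1) hi fuel) := by
        show (if lo < hi then _ else _) = _
        rw [if_pos hlt]
      rw [hstep]
      have hfiff := altFeasible_iff l nd ((lo + hi) / 2) hkeys hnd (by omega)
      by_cases hmf : altFeasible l nd ((lo + hi) / 2) = true
      · rw [if_pos hmf]
        exact ih lo _ (by omega) hmid1 (by omega) hlow (hfiff.mp hmf)
      · rw [if_neg hmf]
        refine ih _ hi (by omega) (by omega) hhi ?_ hfeas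
        intro k hk
        rcases Nat.lt_or_ge k lo with h | h
        · exact hlow k h
        · intro hfk
          exact hmf (hfiff.mpr (FeasP_mono l (by omega) (by omega) hfk))
    · have heq : lo = hi := by omega
      subst heq
      have hstep : altSearch l nd lo lo (fuel + 1) = (lo : Int) := by
        show (if lo < lo then _ else _) = _
        rw [if_neg (lt_irrefl _)]
      rw [hstep]
      congr 1
      refine le_antisymm ?_ (pvMF_le l hfeas)
      by_contra h
      push_neg at h
      exact hlow _ h (pvMF_feas l)

theorem steadyGene_alt_char (gene : String) :
    steadyGene_alt gene = ((pvMF gene.toList : Nat) : Int) := by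
  have hunf : steadyGene_alt gene = altSearch gene.toList (pvND gene.toList) 0
      gene.toList.length (gene.toList.length + 1) := rfl
  rw [hunf]
  exact altSearch_eq gene.toList (pvND gene.toList) (pvND_keys _)
    (fun c hc => pvND_getD _ c hc) (gene.toList.length + 1) 0 gene.toList.length
    (by omega) (by omega) le_rfl (by omega) (FeasP_top _)

theorem pvNZ_len (l : List Char) (hnz : ¬ pvZ l) : 1 ≤ l.length := by
  by_contra h
  exact hnz (pvZ_of_len_zero l (by omega))

theorem final_eq (gene : String) (hpre : Pre_steadyGene gene)
    (hnd : ¬ D_steadyGene gene) : steadyGene gene = steadyGene_alt gene := by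
  rw [steadyGene_alt_char]
  by_cases hz : pvZ gene.toList
  · rw [steadyGene_char_Z gene hpre hz]
    have h0 : pvMF gene.toList = 0 := Nat.le_zero.mp
      (pvMF_le _ ⟨0, by omega, fun c hc => by rw [hz c hc]; omega⟩)
    rw [h0]
    rfl
  · rw [steadyGene_char_NZ gene hpre hz]
    congr 1
    set l := gene.toList with hl
    have hn1 : 1 ≤ l.length := pvNZ_len l hz
    apply le_antisymm
    · -- pvG l 0 0 ≤ pvMF l
      obtain ⟨sw, hsw, hfw⟩ := pvMF_feas l
      rcases Nat.lt_or_ge (pvMF l) l.length with hLn | hLn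
      · rcases Nat.lt_or_ge (sw + pvMF l) l.length with hcase | hcase
        · exact pvG_le l (Or.inl ⟨sw, by omega, by omega, by omega, hfw⟩)
        · -- the only feasible minimal window is the suffix: use ¬ D
          have hsw' : sw = l.length - pvMF l := by omega
          rw [D_iff] at hnd
          push_neg at hnd
          obtain ⟨s', hs'1, hs'2, hs'3⟩ := hnd (pvMF l) hLn (by rw [← hsw']; exact hfw)
          exact pvG_le l (Or.inl ⟨s', by omega, by omega, hs'2, hs'3⟩)
      · calc pvG l 0 0 ≤ l.length := pvG_le_len l 0 0
          _ ≤ pvMF l := hLn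
    · -- pvMF l ≤ pvG l 0 0
      rcases pvG_mem l 0 0 with h | h
      · obtain ⟨s', _, _, h3, h4⟩ := h
        exact pvMF_le l ⟨s', by omega, h4⟩
      · rw [h]
        exact pvMF_le l (FeasP_top l)

-- ===== VERDICT
-- ===== VERDICT (by name: the statement is the Claim_ definition above) =====
theorem steadyGene_spec : Claim_unchanged_steadyGene := by
  intro gene _ hpre
  unfold Spec_steadyGene
  intro hnd
  exact final_eq gene hpre hnd

theorem steadyGene_changed : Claim_changed_steadyGene := by
  unfold Claim_changed_steadyGene
  refine ⟨by simp [Dom_steadyGene, pvDiffWitness_steadyGene, pvDomStr, pvDomChar],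
    by simp [Pre_steadyGene, pvDiffWitness_steadyGene],
    ?_, by decide, by decide, by decide⟩
  rw [D_iff]
  unfold pvDiffWitness_steadyGene
  refine ⟨2, by simp, ?_, ?_⟩
  · intro c hc
    fin_cases hc <;> simp [pvNeed, pvWCnt]
  · rintro ⟨s, hs, h2, hf⟩
    simp at hs h2
    interval_cases s
    · have := hf 'C' (by simp)
      simp [pvNeed, pvWCnt] at this
    · have := hf 'G' (by simp)
      simp [pvNeed, pvWCnt] at this
    · have := hf 'G' (by simp)
      simp [pvNeed, pvWCnt] at this

theorem steadyGene_tight : Claim_exact_steadyGene := by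
  intro gene _ hpre hd
  rw [D_iff] at hd
  obtain ⟨L, hLn, hsuf, hno⟩ := hd
  have hnz : ¬ pvZ gene.toList := by
    intro hz
    exact hno ⟨0, by omega, by omega, fun c hc => by rw [hz c hc]; omega⟩
  rw [steadyGene_char_NZ gene hpre hnz, steadyGene_alt_char]
  set l := gene.toList with hl
  have hMFle : pvMF l ≤ L := pvMF_le l ⟨l.length - L, by omega, hsuf⟩
  have hgt : pvMF l < pvG l 0 0 := by
    rcases pvG_mem l 0 0 with h | h
    · obtain ⟨s', _, _, h3, h4⟩ := h
      by_contra hle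
      push_neg at hle
      have hkL : pvG l 0 0 ≤ L := le_trans hle hMFle
      rcases Nat.lt_or_ge (s' + L) l.length with hcase | hcase
      · exact hno ⟨s', by omega, by omega,
          pvFeas_mono l le_rfl (by omega) h4⟩
      · exact hno ⟨l.length - 1 - L, by omega, by omega,
          pvFeas_mono l (by omega) (by omega) h4⟩
    · have hG : pvG l 0 0 = l.length := h
      omega
  intro heq
  rw [Nat.cast_inj] at heq
  omega
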